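-- pv_equiv track=rewrite | github.com/pypi-data/pypi-mirror-384 | packages/datametria-common-libraries/datametria_common_libraries-1.1.0.tar.gz/datametria_common_libraries-1.1.0/src/datametria_common/monitoring/monitoring_mixins.py | _extract_table_name
-- ===== SOURCE A (Python) =====
-- def _extract_table_name(query: str) -> str:
--     """Extract table name from SQL query."""
--     # Simplified table extraction
--     words = query.split()
--     try:
--         if 'FROM' in [w.upper() for w in words]:
--             from_index = next(i for i, w in enumerate(words) if w.upper() == 'FROM')
--             return words[from_index + 1].strip('`"[]')
--         elif 'INTO' in [w.upper() for w in words]: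
--             into_index = next(i for i, w in enumerate(words) if w.upper() == 'INTO')
--             return words[into_index + 1].strip('`"[]')
--         elif 'UPDATE' in [w.upper() for w in words]:
--             return words[1].strip('`"[]')
--     except (IndexError, StopIteration):
--         pass
--
--     return 'unknown'
-- ===== SOURCE B (Python) =====
-- def _extract_table_name(query: str) -> str:
--     """Extract table name from SQL query (single reverse pass carrying the successor word)."""
--     words = query.split()
--     seen_from = seen_into = seen_update = False
--     res_from = res_into = None
--     nxt = None
--     for w in reversed(words):
--         u = w.upper()
--         if u == 'FROM':
--             seen_from = True
--             res_from = nxt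
--         elif u == 'INTO':
--             seen_into = True
--             res_into = nxt
--         elif u == 'UPDATE':
--             seen_update = True
--         nxt = w
--     if seen_from:
--         return res_from.strip('`"[]') if res_from is not None else 'unknown'
--     if seen_into:
--         return res_into.strip('`"[]') if res_into is not None else 'unknown'
--     if seen_update:
--         return words[1].strip('`"[]') if len(words) > 1 else 'unknown'
--     return 'unknown'
-- ===== Notes on version B (the rewrite author's own statement) =====
-- stated objective: alternative
-- what changed: A makes up to six forward scans (membership comprehensions plus next()/enumerate index searches) and indexes words[idx+1] under try/except; B makes one index-free pass over reversed(words) carrying the successor word in an accumulator, so the last write per keyword is its first occurrence's successor, then applies the same FROM>INTO>UPDATE priority with no exceptions.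
import Mathlib
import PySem

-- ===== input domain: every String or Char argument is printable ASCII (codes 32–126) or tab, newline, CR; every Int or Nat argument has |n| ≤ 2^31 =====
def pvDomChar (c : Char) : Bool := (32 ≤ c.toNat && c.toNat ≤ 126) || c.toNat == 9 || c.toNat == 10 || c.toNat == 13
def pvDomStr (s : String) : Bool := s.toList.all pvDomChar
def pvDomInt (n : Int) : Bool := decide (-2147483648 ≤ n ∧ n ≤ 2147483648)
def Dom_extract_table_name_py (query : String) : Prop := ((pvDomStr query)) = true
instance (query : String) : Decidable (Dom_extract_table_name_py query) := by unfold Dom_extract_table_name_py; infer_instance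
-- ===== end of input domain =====

-- B replaces A's repeated forward scans and try/except indexing by one index-free pass over the
-- reversed word list carrying the successor word, then the same FROM > INTO > UPDATE priority
-- (objective: alternative).

-- ===== PORT A =====
def extract_table_name_py (query : String) : String :=
  let words := PySem.Str.split₀ query
  if (words.map (fun w => PySem.Str.upper w)).contains "FROM" then
    -- the none arm of find? mirrors the caught StopIteration (unreachable when the test holds)
    match (PySem.List.enumerate words 0).find? (fun p => PySem.Str.upper p.2 == "FROM") with
    | some p =>
      match PySem.List.pyGet? words (p.1 + 1) with
      | some w => PySem.Str.stripChars w "`\"[]"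
      | none => "unknown"   -- IndexError caught
    | none => "unknown"
  else if (words.map (fun w => PySem.Str.upper w)).contains "INTO" then
    match (PySem.List.enumerate words 0).find? (fun p => PySem.Str.upper p.2 == "INTO") with
    | some p =>
      match PySem.List.pyGet? words (p.1 + 1) with
      | some w => PySem.Str.stripChars w "`\"[]"
      | none => "unknown"
    | none => "unknown"
  else if (words.map (fun w => PySem.Str.upper w)).contains "UPDATE" then
    match PySem.List.pyGet? words 1 with
    | some w => PySem.Str.stripChars w "`\"[]"
    | none => "unknown"
  else "unknown"

-- ===== PORT B =====
-- loop body of B: state (seen_from, res_from, seen_into, res_into, seen_update, nxt)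
def pvStepB (st : Bool × Option String × Bool × Option String × Bool × Option String)
    (w : String) : Bool × Option String × Bool × Option String × Bool × Option String :=
  let (sF, rF, sI, rI, sU, nxt) := st
  let u := PySem.Str.upper w
  if u == "FROM" then (true, nxt, sI, rI, sU, some w)
  else if u == "INTO" then (sF, rF, true, nxt, sU, some w)
  else if u == "UPDATE" then (sF, rF, sI, rI, true, some w)
  else (sF, rF, sI, rI, sU, some w)

def extract_table_name_py_alt (query : String) : String :=
  let words := PySem.Str.split₀ query
  let st := words.reverse.foldl pvStepB (false, none, false, none, false, none)
  if st.1 then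
    match st.2.1 with
    | some w => PySem.Str.stripChars w "`\"[]"
    | none => "unknown"
  else if st.2.2.1 then
    match st.2.2.2.1 with
    | some w => PySem.Str.stripChars w "`\"[]"
    | none => "unknown"
  else if st.2.2.2.2.1 then
    if 1 < words.length then PySem.Str.stripChars (words.getD 1 "") "`\"[]" else "unknown"
  else "unknown"

-- ===== PRECONDITION & SPEC =====
def Spec_extract_table_name_py (query : String) (out : String) : Prop := out = extract_table_name_py_alt query
instance (query : String) (out : String) : Decidable (Spec_extract_table_name_py query out) := by unfold Spec_extract_table_name_py; infer_instance

-- ===== CLAIM (what is proved, stated in full; the proofs are below) =====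
def Claim_equal_extract_table_name_py : Prop := ∀ (query : String), Dom_extract_table_name_py query → Spec_extract_table_name_py query (extract_table_name_py query)

-- ===== LEMMAS AND PROOFS =====

/-- proof-only: the successor of the first word whose uppercasing is `k`
    (`none` = no such word; `some none` = it is the last word). -/
def pvFirstSucc (k : String) : List String → Option (Option String)
  | [] => none
  | w :: ws => if PySem.Str.upper w == k then some ws.head? else pvFirstSucc k ws

/-- B's reverse fold computes exactly the first-occurrence successors and an any-flag. -/
theorem foldB_eq (ws : List String) :
    ws.reverse.foldl pvStepB (false, none, false, none, false, none)
    = ((pvFirstSucc "FROM" ws).isSome, (pvFirstSucc "FROM" ws).join,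
       (pvFirstSucc "INTO" ws).isSome, (pvFirstSucc "INTO" ws).join,
       ws.any (fun w => PySem.Str.upper w == "UPDATE"), ws.head?) := by
  induction ws with
  | nil => simp [pvFirstSucc]
  | cons w ws ih =>
    rw [List.reverse_cons, List.foldl_append, ih]
    simp only [List.foldl_cons, List.foldl_nil]
    by_cases hF : PySem.Str.upper w = "FROM"
    · simp [pvStepB, pvFirstSucc, hF]
    · by_cases hI : PySem.Str.upper w = "INTO"
      · simp [pvStepB, pvFirstSucc, hI]
      · by_cases hU : PySem.Str.upper w = "UPDATE"
        · simp [pvStepB, pvFirstSucc, hU]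
        · simp [pvStepB, pvFirstSucc, hF, hI, hU]

/-- membership of a keyword in the uppercased word list ↔ pvFirstSucc succeeds -/
theorem contains_iff_firstSucc (ws : List String) (k : String) :
    ((ws.map (fun w => PySem.Str.upper w)).contains k) = (pvFirstSucc k ws).isSome := by
  induction ws with
  | nil => simp [pvFirstSucc]
  | cons w ws ih =>
    by_cases h : PySem.Str.upper w = k
    · simp [pvFirstSucc, h]
    · rw [List.map_cons, List.contains_cons,
        show pvFirstSucc k (w :: ws) = pvFirstSucc k ws from by simp [pvFirstSucc, h],
        ← ih]
      simp [Ne.symm h]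

/-- A's find?-then-index branch equals the pvFirstSucc characterisation,
    generalised over an already-consumed prefix. -/
theorem keyBranch_eq (k : String) (pre ws : List String) :
    (match (PySem.List.enumerate ws (pre.length : Int)).find?
        (fun p => PySem.Str.upper p.2 == k) with
     | some p =>
       match PySem.List.pyGet? (pre ++ ws) (p.1 + 1) with
       | some w => PySem.Str.stripChars w "`\"[]"
       | none => "unknown"
     | none => "unknown")
    = (match pvFirstSucc k ws with
       | some (some w) => PySem.Str.stripChars w "`\"[]"
       | some none => "unknown"
       | none => "unknown") := by
  induction ws generalizing pre with
  | nil => simp [PySem.List.enumerate_nil, pvFirstSucc]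
  | cons w ws ih =>
    rw [PySem.List.enumerate_cons, List.find?_cons]
    by_cases h : PySem.Str.upper w = k
    · have hpred : (PySem.Str.upper ((pre.length : Int), w).2 == k) = true := by simp [h]
      rw [hpred]
      have hget : PySem.List.pyGet? (pre ++ w :: ws) ((pre.length : Int) + 1) = ws.head? := by
        have hcast : ((pre.length : Int) + 1) = ((pre.length + 1 : Nat) : Int) := by push_cast; ring
        rw [hcast, PySem.List.pyGet?_natCast]
        rw [List.getElem?_append_right (by omega)]
        simp [List.head?_eq_getElem?]
      simp only [hget]
      rw [show pvFirstSucc k (w :: ws) = some ws.head? from by simp [pvFirstSucc, h]]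
      rcases ws.head? with _ | w' <;> rfl
    · have hpred : (PySem.Str.upper ((pre.length : Int), w).2 == k) = false := by simp [h]
      rw [hpred]
      have hlen : ((pre.length : Int) + 1) = (((pre ++ [w]).length : Nat) : Int) := by
        simp only [List.length_append, List.length_cons, List.length_nil]; push_cast; ring
      have happ : pre ++ w :: ws = (pre ++ [w]) ++ ws := by simp
      rw [hlen, happ, ih (pre ++ [w]),
        show pvFirstSucc k (w :: ws) = pvFirstSucc k ws from by simp [pvFirstSucc, h]]

theorem update_branch_eq (ws : List String) :
    (match PySem.List.pyGet? ws 1 with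
     | some w => PySem.Str.stripChars w "`\"[]"
     | none => "unknown")
    = (if 1 < ws.length then PySem.Str.stripChars (ws.getD 1 "") "`\"[]" else "unknown") := by
  have hcast : (1 : Int) = ((1 : Nat) : Int) := by norm_num
  by_cases h : 1 < ws.length
  · have h1 : PySem.List.pyGet? ws 1 = some ws[1] := by
      rw [hcast, PySem.List.pyGet?_natCast, List.getElem?_eq_getElem h]
    have h2 : ws.getD 1 "" = ws[1] := by
      rw [List.getD_eq_getElem?_getD, List.getElem?_eq_getElem h]; rfl
    rw [h1, h2, if_pos h]
  · have h1 : PySem.List.pyGet? ws 1 = none := by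
      rw [hcast, PySem.List.pyGet?_natCast, List.getElem?_eq_none (by omega)]
    rw [h1, if_neg h]

/-- any over the keyword predicate agrees with pvFirstSucc success -/
theorem any_eq_firstSucc (ws : List String) (k : String) :
    ws.any (fun w => PySem.Str.upper w == k) = (pvFirstSucc k ws).isSome := by
  induction ws with
  | nil => simp [pvFirstSucc]
  | cons w ws ih =>
    by_cases h : PySem.Str.upper w = k
    · simp [pvFirstSucc, h]
    · simp [pvFirstSucc, h, ih]

-- proof-only restatements of the two port bodies over an arbitrary word list
def pvABody (words : List String) : String :=
  if (words.map (fun w => PySem.Str.upper w)).contains "FROM" then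
    match (PySem.List.enumerate words 0).find? (fun p => PySem.Str.upper p.2 == "FROM") with
    | some p =>
      match PySem.List.pyGet? words (p.1 + 1) with
      | some w => PySem.Str.stripChars w "`\"[]"
      | none => "unknown"
    | none => "unknown"
  else if (words.map (fun w => PySem.Str.upper w)).contains "INTO" then
    match (PySem.List.enumerate words 0).find? (fun p => PySem.Str.upper p.2 == "INTO") with
    | some p =>
      match PySem.List.pyGet? words (p.1 + 1) with
      | some w => PySem.Str.stripChars w "`\"[]"
      | none => "unknown"
    | none => "unknown"
  else if (words.map (fun w => PySem.Str.upper w)).contains "UPDATE" then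
    match PySem.List.pyGet? words 1 with
    | some w => PySem.Str.stripChars w "`\"[]"
    | none => "unknown"
  else "unknown"

def pvBBody (words : List String) : String :=
  let st := words.reverse.foldl pvStepB (false, none, false, none, false, none)
  if st.1 then
    match st.2.1 with
    | some w => PySem.Str.stripChars w "`\"[]"
    | none => "unknown"
  else if st.2.2.1 then
    match st.2.2.2.1 with
    | some w => PySem.Str.stripChars w "`\"[]"
    | none => "unknown"
  else if st.2.2.2.2.1 then
    if 1 < words.length then PySem.Str.stripChars (words.getD 1 "") "`\"[]" else "unknown"
  else "unknown"

theorem core_eq (ws : List String) : pvABody ws = pvBBody ws := by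
  unfold pvABody pvBBody
  rw [foldB_eq]
  have hkF := keyBranch_eq "FROM" [] ws
  have hkI := keyBranch_eq "INTO" [] ws
  simp only [List.length_nil, Nat.cast_zero, List.nil_append] at hkF hkI
  rcases hFS : pvFirstSucc "FROM" ws with _ | oF
  · rcases hIS : pvFirstSucc "INTO" ws with _ | oI
    · rw [show ((ws.map (fun w => PySem.Str.upper w)).contains "FROM") = false from by
          rw [contains_iff_firstSucc, hFS]; rfl,
        show ((ws.map (fun w => PySem.Str.upper w)).contains "INTO") = false from by
          rw [contains_iff_firstSucc, hIS]; rfl]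
      simp only [Bool.false_eq_true, if_false, Option.isSome_none]
      rw [contains_iff_firstSucc, any_eq_firstSucc]
      rcases hUS : pvFirstSucc "UPDATE" ws with _ | oU
      · rfl
      · simp only [Option.isSome_some, if_true]
        exact update_branch_eq ws
    · rw [show ((ws.map (fun w => PySem.Str.upper w)).contains "FROM") = false from by
          rw [contains_iff_firstSucc, hFS]; rfl,
        show ((ws.map (fun w => PySem.Str.upper w)).contains "INTO") = true from by
          rw [contains_iff_firstSucc, hIS]; rfl]
      simp only [Bool.false_eq_true, if_false, Option.isSome_none, Option.isSome_some,
        if_true]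
      rw [hkI, hIS]
      rcases oI with _ | w' <;> rfl
  · rw [show ((ws.map (fun w => PySem.Str.upper w)).contains "FROM") = true from by
        rw [contains_iff_firstSucc, hFS]; rfl]
    simp only [Option.isSome_some, if_true]
    rw [hkF, hFS]
    rcases oF with _ | w' <;> rfl

theorem main_eq (query : String) :
    extract_table_name_py query = extract_table_name_py_alt query :=
  core_eq (PySem.Str.split₀ query)

-- ===== VERDICT (by name: the statement is the Claim_ definition above) =====
theorem extract_table_name_py_spec : Claim_equal_extract_table_name_py := by
  intro query _
  unfold Spec_extract_table_name_py
  exact main_eq query
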